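-- pv_equiv track=rewrite | github.com/Diederikjh/tlg | tlg/main.py | get_right_edge
-- ===== SOURCE A (Python) =====
-- def get_right_edge(piece):
--     shape = piece["shape"]
--     right_edge = 0
--     for row in shape:
--         # Find the index of the last non-zero element in the row
--         row_edge = next((i for i, x in reversed(list(enumerate(row))) if x != 0), -1)
--         # Update the right edge if necessary
--         if row_edge > right_edge:
--             right_edge = row_edge
--     return right_edge
-- ===== SOURCE B (Python) =====
-- def get_right_edge(piece):
--     return max((i for row in piece["shape"] for i, x in enumerate(row) if x != 0), default=0)
-- ===== Notes on version B (the rewrite author's own statement) =====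
-- stated objective: simpler
-- what changed: Replaced the per-row reversed-enumerate scan for the last nonzero index plus a running comparison with one flat maximization over all nonzero cell column indices (max with default=0).
import Mathlib
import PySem

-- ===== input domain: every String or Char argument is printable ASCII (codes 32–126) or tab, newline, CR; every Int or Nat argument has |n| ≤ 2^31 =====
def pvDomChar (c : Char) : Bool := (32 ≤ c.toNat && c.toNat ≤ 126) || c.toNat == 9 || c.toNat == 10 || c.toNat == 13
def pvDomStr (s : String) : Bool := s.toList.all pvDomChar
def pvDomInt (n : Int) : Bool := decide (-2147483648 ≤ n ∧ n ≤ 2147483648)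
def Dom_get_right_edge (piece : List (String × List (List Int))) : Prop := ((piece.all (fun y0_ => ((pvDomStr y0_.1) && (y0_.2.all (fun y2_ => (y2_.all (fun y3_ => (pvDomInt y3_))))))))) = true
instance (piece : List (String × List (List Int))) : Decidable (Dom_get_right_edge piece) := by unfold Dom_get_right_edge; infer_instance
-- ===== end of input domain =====

-- B replaces A's per-row reversed scan for the last nonzero index (with a -1 sentinel and a
-- running comparison) by one flat maximization over all nonzero cell column indices, default 0 (simpler).


-- ===== PORT A =====
-- next((i for i, x in reversed(list(enumerate(row))) if x != 0), -1)
def pvRowEdge (row : List Int) : Int :=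
  match (PySem.List.enumerate row).reverse.find? (fun p => p.2 ≠ 0) with
  | some p => p.1
  | none => -1

def get_right_edge (piece : List (String × List (List Int))) : Int :=
  -- piece["shape"]: first-match association-list lookup (KeyError excluded by Pre_)
  let shape := ((piece.find? (fun kv => kv.1 == "shape")).map (·.2)).getD []
  shape.foldl (fun right_edge row =>
    let row_edge := pvRowEdge row
    if row_edge > right_edge then row_edge else right_edge) 0

-- ===== PORT B =====
-- max((i for row in shape for i, x in enumerate(row) if x != 0), default=0)
def get_right_edge_alt (piece : List (String × List (List Int))) : Int :=
  let shape := ((piece.find? (fun kv => kv.1 == "shape")).map (·.2)).getD []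
  shape.foldl (fun m row =>
    (PySem.List.enumerate row).foldl (fun m p => if p.2 ≠ 0 then max m p.1 else m) m) 0

-- ===== PRECONDITION & SPEC =====
-- Pre_ excludes only the inputs where A raises KeyError: no "shape" key in the dict.
def Pre_get_right_edge (piece : List (String × List (List Int))) : Prop :=
  (piece.find? (fun kv => kv.1 == "shape")).isSome = true
instance (piece : List (String × List (List Int))) : Decidable (Pre_get_right_edge piece) := by unfold Pre_get_right_edge; infer_instance

def pvWitness_get_right_edge : (List (String × List (List Int))) := [("shape", [[1, 0], [0, 2]])]

def Spec_get_right_edge (piece : List (String × List (List Int))) (out : Int) : Prop := out = get_right_edge_alt piece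
instance (piece : List (String × List (List Int))) (out : Int) : Decidable (Spec_get_right_edge piece out) := by unfold Spec_get_right_edge; infer_instance

-- ===== CLAIM (what is proved, stated in full; the proofs are below) =====
def Claim_equal_get_right_edge : Prop := ∀ (piece : List (String × List (List Int))), Dom_get_right_edge piece → Pre_get_right_edge piece → Spec_get_right_edge piece (get_right_edge piece)

-- ===== LEMMAS AND PROOFS =====

-- Per-row: B's inner max-fold equals A's "compare last-nonzero index" update, for a
-- strictly index-increasing pair list and a nonnegative accumulator.
theorem pv_inner_eq (l : List (Int × Int)) (m : Int) (hm : 0 ≤ m)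
    (hp : l.Pairwise (fun p q => p.1 < q.1)) :
    l.foldl (fun m p => if p.2 ≠ 0 then max m p.1 else m) m =
      (if (match l.reverse.find? (fun p => p.2 ≠ 0) with
            | some p => p.1 | none => (-1 : Int)) > m
       then (match l.reverse.find? (fun p => p.2 ≠ 0) with
            | some p => p.1 | none => (-1 : Int)) else m) := by
  induction l using List.reverseRecOn with
  | nil =>
    simp
    omega
  | append_singleton l a ih =>
    have hp' : l.Pairwise (fun p q => p.1 < q.1) := (List.pairwise_append.mp hp).1
    have hlt : ∀ p ∈ l, p.1 < a.1 := fun p h => (List.pairwise_append.mp hp).2.2 p h a (by simp)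
    rw [List.foldl_append, List.reverse_append]
    simp only [List.foldl_cons, List.foldl_nil, List.reverse_singleton, List.singleton_append]
    by_cases ha : a.2 = 0
    · rw [List.find?_cons_of_neg (by simp [ha]), if_neg (fun h => h ha)]
      exact ih hp'
    · rw [List.find?_cons_of_pos (by simpa using ha), if_pos ha, ih hp']
      rcases hfind : l.reverse.find? (fun p => decide (p.2 ≠ 0)) with _ | p
      · simp only [hfind, max_def]
        split_ifs <;> omega
      · have hpm : p.1 < a.1 := hlt p (List.mem_reverse.mp (List.mem_of_find?_eq_some hfind))
        simp only [hfind, max_def]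
        split_ifs <;> omega

-- Outer fold: both loops agree from any nonnegative accumulator.
theorem pv_fold_eq (shape : List (List Int)) (m : Int) (hm : 0 ≤ m) :
    shape.foldl (fun right_edge row =>
      let row_edge := pvRowEdge row
      if row_edge > right_edge then row_edge else right_edge) m =
    shape.foldl (fun m row =>
      (PySem.List.enumerate row).foldl (fun m p => if p.2 ≠ 0 then max m p.1 else m) m) m := by
  induction shape generalizing m with
  | nil => rfl
  | cons r rest ih =>
    rw [List.foldl_cons, List.foldl_cons]
    dsimp only
    have hstep : 0 ≤ (if pvRowEdge r > m then pvRowEdge r else m) := by split <;> omega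
    rw [show List.foldl (fun m p => if p.2 ≠ 0 then max m p.1 else m) m (PySem.List.enumerate r) =
          (if pvRowEdge r > m then pvRowEdge r else m) from
        pv_inner_eq (PySem.List.enumerate r) m hm (PySem.List.pairwise_lt_enumerate r 0),
      ← ih _ hstep]

-- ===== VERDICT (by name: the statement is the Claim_ definition above) =====
theorem get_right_edge_spec : Claim_equal_get_right_edge := by
  intro piece _ _
  unfold Spec_get_right_edge get_right_edge get_right_edge_alt
  exact pv_fold_eq _ 0 le_rfl
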